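-- pv_equiv track=rewrite | github.com/PriyaRBTR/AIBugAnalyzer | backend/app/api/endpoints/analytics.py | _calculate_area_impact
-- ===== SOURCE A (Python) =====
-- from typing import Dict, List, Optional, Any
--
-- def _calculate_area_impact(bugs: List[Dict[str, Any]]) -> Dict[str, Any]:
--     """Calculate impact by area"""
--     area_impact = {}
--     for bug in bugs:
--         area = bug.get("area_path", "Unknown")
--         if area not in area_impact:
--             area_impact[area] = {"count": 0, "high_priority": 0, "critical_severity": 0}
--
--         area_impact[area]["count"] += 1
--
--         if "1" in str(bug.get("priority", "")) or "High" in str(bug.get("priority", "")):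
--             area_impact[area]["high_priority"] += 1
--
--         if "1" in str(bug.get("severity", "")) or "Critical" in str(bug.get("severity", "")):
--             area_impact[area]["critical_severity"] += 1
--
--     return area_impact
-- ===== SOURCE B (Python) =====
-- def _calculate_area_impact(bugs):
--     """Calculate impact by area: group bugs per area first, then summarize each group."""
--     groups = {}
--     for bug in bugs:
--         groups.setdefault(bug.get("area_path", "Unknown"), []).append(bug)
--     result = {}
--     for area, group in groups.items():
--         high = [b for b in group
--                 if "1" in str(b.get("priority", "")) or "High" in str(b.get("priority", ""))]
--         crit = [b for b in group
--                 if "1" in str(b.get("severity", "")) or "Critical" in str(b.get("severity", ""))]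
--         result[area] = {"count": len(group), "high_priority": len(high),
--                         "critical_severity": len(crit)}
--     return result
-- ===== Notes on version B (the rewrite author's own statement) =====
-- stated objective: alternative
-- what changed: B replaces A's single pass of incremental nested-dict counters with a two-phase decomposition: first group the bugs into per-area lists via setdefault, then summarize each group by filtering it with the priority/severity predicates, never incrementing a counter.
import Mathlib
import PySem

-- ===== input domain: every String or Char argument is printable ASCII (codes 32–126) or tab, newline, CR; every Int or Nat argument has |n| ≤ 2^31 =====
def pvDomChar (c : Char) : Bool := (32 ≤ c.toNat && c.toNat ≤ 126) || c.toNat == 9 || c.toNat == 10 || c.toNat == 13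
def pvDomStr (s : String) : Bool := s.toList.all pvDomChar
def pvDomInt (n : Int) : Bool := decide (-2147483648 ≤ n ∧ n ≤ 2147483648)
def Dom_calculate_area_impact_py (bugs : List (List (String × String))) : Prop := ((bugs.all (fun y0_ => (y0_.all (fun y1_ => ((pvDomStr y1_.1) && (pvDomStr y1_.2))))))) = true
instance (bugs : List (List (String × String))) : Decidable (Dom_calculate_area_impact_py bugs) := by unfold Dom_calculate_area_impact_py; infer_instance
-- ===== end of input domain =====

-- B re-implements A by grouping the bugs per area first and then summarizing each
-- group (two passes) instead of A's single pass of incremental nested-dict counters;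
-- same O(n) cost, alternative decomposition.

-- shared field accessors (the same expressions both Pythons evaluate on a bug)
def pvAreaOf (bug : List (String × String)) : String :=
  (PySem.Dict.mk bug).getD "area_path" "Unknown"

def pvHighPri (bug : List (String × String)) : Bool :=
  PySem.Str.isIn "1" ((PySem.Dict.mk bug).getD "priority" "") ||
  PySem.Str.isIn "High" ((PySem.Dict.mk bug).getD "priority" "")

def pvCritSev (bug : List (String × String)) : Bool :=
  PySem.Str.isIn "1" ((PySem.Dict.mk bug).getD "severity" "") ||
  PySem.Str.isIn "Critical" ((PySem.Dict.mk bug).getD "severity" "")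

-- ===== PORT A =====
-- the three increment lines of A's loop body on the inner per-area dict
def pvBump (bug : List (String × String)) (inner : PySem.Dict String Int) : PySem.Dict String Int :=
  let inner := inner.modify "count" 0 (· + 1)
  let inner := if pvHighPri bug then inner.modify "high_priority" 0 (· + 1) else inner
  let inner := if pvCritSev bug then inner.modify "critical_severity" 0 (· + 1) else inner
  inner

-- one iteration of A's loop over bugs
def pvStepA (d : PySem.Dict String (PySem.Dict String Int)) (bug : List (String × String)) :
    PySem.Dict String (PySem.Dict String Int) :=
  let area := pvAreaOf bug
  let d1 := if d.contains area then d
    else d.insert area (PySem.Dict.mk [("count", 0), ("high_priority", 0), ("critical_severity", 0)])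
  d1.insert area (pvBump bug (d1.getD area (PySem.Dict.mk [])))

def calculate_area_impact_py (bugs : List (List (String × String))) :
    List (String × List (String × Int)) :=
  ((bugs.foldl pvStepA PySem.Dict.empty).items).map (fun p => (p.1, p.2.items))

-- ===== PORT B =====
-- the summary dict B builds for one area's group of bugs
def pvSummary (group : List (List (String × String))) : List (String × Int) :=
  [("count", (group.length : Int)),
   ("high_priority", ((group.filter pvHighPri).length : Int)),
   ("critical_severity", ((group.filter pvCritSev).length : Int))]

def calculate_area_impact_py_alt (bugs : List (List (String × String))) :
    List (String × List (String × Int)) :=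
  let groups := bugs.foldl (fun g bug => g.modify (pvAreaOf bug) [] (· ++ [bug])) PySem.Dict.empty
  groups.items.map (fun p => (p.1, pvSummary p.2))

-- ===== PRECONDITION & SPEC =====
def Spec_calculate_area_impact_py (bugs : List (List (String × String))) (out : List (String × List (String × Int))) : Prop := out = calculate_area_impact_py_alt bugs
instance (bugs : List (List (String × String))) (out : List (String × List (String × Int))) : Decidable (Spec_calculate_area_impact_py bugs out) := by unfold Spec_calculate_area_impact_py; infer_instance

-- ===== CLAIM (what is proved, stated in full; the proofs are below) =====
def Claim_equal_calculate_area_impact_py : Prop := ∀ (bugs : List (List (String × String))), Dom_calculate_area_impact_py bugs → Spec_calculate_area_impact_py bugs (calculate_area_impact_py bugs)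

-- ===== LEMMAS AND PROOFS =====

-- A's accumulator, reconstructed from B's grouping accumulator
def pvSummar (g : PySem.Dict String (List (List (String × String)))) :
    PySem.Dict String (PySem.Dict String Int) :=
  PySem.Dict.mk (g.items.map (fun p => (p.1, PySem.Dict.mk (pvSummary p.2))))

lemma pvSummar_contains (g : PySem.Dict String (List (List (String × String)))) (a : String) :
    (pvSummar g).contains a = g.contains a := by
  simp [pvSummar, PySem.Dict.contains, List.any_map, Function.comp_def]

lemma pvSummar_get? (g : PySem.Dict String (List (List (String × String)))) (a : String) :
    (pvSummar g).get? a = (g.get? a).map (fun bs => PySem.Dict.mk (pvSummary bs)) := by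
  simp [pvSummar, PySem.Dict.get?, List.find?_map, Function.comp_def]

lemma pvBump_summary (bug : List (String × String)) (group : List (List (String × String))) :
    pvBump bug (PySem.Dict.mk (pvSummary group)) = PySem.Dict.mk (pvSummary (group ++ [bug])) := by
  simp only [pvBump, pvSummary, PySem.Dict.modify, PySem.Dict.insert, PySem.Dict.contains,
    PySem.Dict.getD, PySem.Dict.get?, List.filter_append]
  by_cases h1 : pvHighPri bug <;> by_cases h2 : pvCritSev bug <;>
    simp [h1, h2, List.filter]

lemma pvStepA_summar (g : PySem.Dict String (List (List (String × String))))
    (bug : List (String × String)) :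
    pvStepA (pvSummar g) bug = pvSummar (g.modify (pvAreaOf bug) [] (· ++ [bug])) := by
  by_cases h : g.contains (pvAreaOf bug) = true
  · -- area already present: both sides overwrite in place
    have hs : (pvSummar g).contains (pvAreaOf bug) = true := by rw [pvSummar_contains]; exact h
    obtain ⟨bs, hbs⟩ : ∃ bs, g.get? (pvAreaOf bug) = some bs :=
      Option.isSome_iff_exists.mp (by rw [← PySem.Dict.contains_eq_isSome_get?]; exact h)
    have hgetS : (pvSummar g).getD (pvAreaOf bug) (PySem.Dict.mk []) = PySem.Dict.mk (pvSummary bs) := by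
      simp [PySem.Dict.getD, pvSummar_get?, hbs]
    have hgetG : g.getD (pvAreaOf bug) [] = bs := by simp [PySem.Dict.getD, hbs]
    simp only [pvStepA, PySem.Dict.modify, hs, if_true, hgetS, pvBump_summary, hgetG]
    apply PySem.Dict.ext
    rw [PySem.Dict.items_insert_of_contains _ _ hs]
    simp only [pvSummar]
    rw [PySem.Dict.items_insert_of_contains _ _ h]
    simp only [List.map_map]
    congr 1
    funext p
    by_cases hp : p.1 = pvAreaOf bug <;> simp [hp]
  · -- fresh area: both sides append
    have h' : g.contains (pvAreaOf bug) = false := by simpa using h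
    have hs : (pvSummar g).contains (pvAreaOf bug) = false := by rw [pvSummar_contains]; exact h'
    have hget0 : g.getD (pvAreaOf bug) [] = [] :=
      PySem.Dict.getD_of_not_contains _ _ h'
    have hb : pvBump bug (PySem.Dict.mk [("count", 0), ("high_priority", 0), ("critical_severity", 0)]) =
        PySem.Dict.mk (pvSummary [bug]) := by
      have := pvBump_summary bug []
      simpa [pvSummary] using this
    simp only [pvStepA, PySem.Dict.modify, hs, Bool.false_eq_true, if_false,
      PySem.Dict.getD_insert_self, hget0, hb]
    have hnone : ∀ p ∈ g.items, ¬ p.1 = pvAreaOf bug := by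
      intro p hp hc
      have hT : g.contains (pvAreaOf bug) = true := by
        simp only [PySem.Dict.contains, List.any_eq_true]
        exact ⟨p, hp, by simp [hc]⟩
      rw [hT] at h'; exact Bool.noConfusion h'
    apply PySem.Dict.ext
    rw [PySem.Dict.items_insert_of_contains _ _ (PySem.Dict.contains_insert_self _ _ _),
        PySem.Dict.items_insert_of_not_contains _ _ hs]
    simp only [pvSummar]
    rw [PySem.Dict.items_insert_of_not_contains _ _ h']
    simp only [List.map_append, List.map_map]
    congr 1
    · exact (List.map_congr_left (fun p hp => by simp [hnone p hp]))
    · simp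

lemma pvFold_summar (bugs : List (List (String × String)))
    (g : PySem.Dict String (List (List (String × String)))) :
    bugs.foldl pvStepA (pvSummar g) =
      pvSummar (bugs.foldl (fun g bug => g.modify (pvAreaOf bug) [] (· ++ [bug])) g) := by
  induction bugs generalizing g with
  | nil => rfl
  | cons b bs ih => simp only [List.foldl_cons, pvStepA_summar]; exact ih _

-- ===== VERDICT (by name: the statement is the Claim_ definition above) =====
theorem calculate_area_impact_py_spec : Claim_equal_calculate_area_impact_py := by
  intro bugs _
  unfold Spec_calculate_area_impact_py calculate_area_impact_py calculate_area_impact_py_alt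
  have h0 : (PySem.Dict.empty : PySem.Dict String (PySem.Dict String Int)) = pvSummar PySem.Dict.empty := rfl
  rw [h0, pvFold_summar]
  simp [pvSummar, List.map_map, Function.comp_def]
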